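-- pv_equiv track=rewrite | github.com/alejoriosm04/university-repository | 2-semester/Data-structure-and-algorithms-I/labs/seguimiento-2/seguimiento-2.4/Ciudad.py | ciudadUnida
-- ===== SOURCE A (Python) =====
-- def convert(mat):
--     diccionario = dict()
--     for i in range(len(mat)):
--         for j in range(len(mat[i])):
--             if mat[i][j] in diccionario:
--                 diccionario[mat[i][j]] = diccionario[mat[i][j]].union(set(mat[i]))
--             else:
--                 diccionario[mat[i][j]] = set(mat[i])
--
--     for i in range(len(mat)):
--         for j in range(len(mat[i])):
--             diccionario[mat[i][j]] = list(diccionario[mat[i][j]])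
--
--     return diccionario
--
-- def dfs(visited, graph, actual):
--     if actual not in visited:
--         visited.append(actual)
--         for neightbour in graph[actual]:
--             dfs(visited,graph,neightbour)
--
-- def ciudadUnida(N, M, mat):
--     counter = 0
--     diccionario = convert(mat)
--     visited = []
--     for key1 in diccionario.keys():
--         for key2 in diccionario.keys():
--             # if bfs(key1, key2, diccionario) is False:
--             #     counter += 1
--             # else:
--             #     continue
--             dfs(visited, diccionario, key1)
--             if key2 not in visited:
--                 counter += 1
--
--     return counter
-- ===== SOURCE B (Python) =====
-- def dfs(visited, graph, actual):
--     if actual not in visited: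
--         visited.append(actual)
--         for neightbour in graph[actual]:
--             dfs(visited, graph, neightbour)
--
-- def ciudadUnida(N, M, mat):
--     # build the adjacency dict in ONE pass, computing set(row) once per row
--     graph = {}
--     for row in mat:
--         s = set(row)
--         for x in row:
--             graph[x] = graph.get(x, set()) | s
--     # single cumulative pass over the keys: the inner key2-scan of A collapses
--     # to arithmetic, since after dfs the uncovered keys number total - len(visited)
--     visited = []
--     total = len(graph)
--     counter = 0
--     for key in graph:
--         dfs(visited, graph, key)
--         counter += total - len(visited)
--     return counter
-- ===== Notes on version B (the rewrite author's own statement) =====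
-- stated objective: faster
-- what changed: B builds the adjacency dict in one pass (set(row) hoisted, no second list-conversion pass) and replaces A's quadratic key1/key2 double loop - which re-runs dfs and scans the visited list for every ordered key pair - with a single cumulative pass that adds total - len(visited) per key.
import Mathlib
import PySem

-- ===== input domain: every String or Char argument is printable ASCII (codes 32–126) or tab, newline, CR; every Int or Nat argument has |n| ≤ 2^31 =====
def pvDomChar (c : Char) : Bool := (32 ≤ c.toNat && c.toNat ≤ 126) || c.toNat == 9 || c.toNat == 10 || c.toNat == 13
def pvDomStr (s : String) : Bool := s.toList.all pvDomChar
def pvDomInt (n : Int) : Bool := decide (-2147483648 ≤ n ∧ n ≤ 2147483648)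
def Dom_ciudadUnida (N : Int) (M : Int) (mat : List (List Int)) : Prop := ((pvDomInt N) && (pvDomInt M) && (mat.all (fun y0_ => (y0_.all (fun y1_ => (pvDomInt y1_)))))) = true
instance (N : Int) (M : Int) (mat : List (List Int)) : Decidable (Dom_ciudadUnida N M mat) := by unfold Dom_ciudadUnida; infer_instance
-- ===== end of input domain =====

-- B is a one-pass rebuild of A's adjacency dict plus a single cumulative pass over the keys
-- (counter += total - len(visited)) replacing A's quadratic key1/key2 double loop; return values
-- proved equal on all inputs (both Pythons only build local state, no argument is mutated).

-- ===== PORT A =====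
-- dfs helper, shared verbatim by both Pythons (Source A and Source B contain the same recursive dfs).
-- `graph.getD actual []` ports `graph[actual]`: exact here because in both programs every node
-- dfs is ever called on is a key of graph (adjacency values are elements of mat, hence keys).
-- The fuel argument only makes the recursion structural; both ports call it with the same
-- fuel graph.size + 2, which exceeds the recursion depth (each nested call adds a new key
-- to visited, so the depth never exceeds the number of keys plus one).
def pvDfs (graph : PySem.Dict Int (List Int)) : Nat → List Int → Int → List Int
  | 0, visited, _ => visited
  | fuel + 1, visited, actual =>
    if visited.contains actual then visited
    else (graph.getD actual []).foldl (fun vis n => pvDfs graph fuel vis n) (visited ++ [actual])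

def ciudadUnida (N : Int) (M : Int) (mat : List (List Int)) : Int :=
  -- convert, first loop: diccionario[mat[i][j]] = union of set(mat[i]) over rows containing it
  let d1 := (PySem.List.pyRange 0 (PySem.List.len mat) 1).foldl (fun d i =>
      (PySem.List.pyRange 0 (PySem.List.len (PySem.List.pyGetD mat i [])) 1).foldl (fun d j =>
        let x := PySem.List.pyGetD (PySem.List.pyGetD mat i []) j 0
        if d.contains x then
          d.insert x (PySem.Set.union (d.getD x []) (PySem.Set.ofList (PySem.List.pyGetD mat i [])))
        else
          d.insert x (PySem.Set.ofList (PySem.List.pyGetD mat i []))) d)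
      (PySem.Dict.empty : PySem.Dict Int (List Int))
  -- convert, second loop: diccionario[mat[i][j]] = list(diccionario[mat[i][j]])
  -- (a PySem.Set Int IS a List Int, so list(s) is the value itself)
  let dic := (PySem.List.pyRange 0 (PySem.List.len mat) 1).foldl (fun d i =>
      (PySem.List.pyRange 0 (PySem.List.len (PySem.List.pyGetD mat i [])) 1).foldl (fun d j =>
        let x := PySem.List.pyGetD (PySem.List.pyGetD mat i []) j 0
        d.insert x (d.getD x [])) d) d1
  -- main double loop over the keys, with the cumulative visited list
  (dic.keys.foldl (fun (st : Int × List Int) key1 =>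
      dic.keys.foldl (fun (st : Int × List Int) key2 =>
        let visited := pvDfs dic (dic.size + 2) st.2 key1
        if visited.contains key2 then (st.1, visited) else (st.1 + 1, visited)) st)
    ((0 : Int), ([] : List Int))).1

-- ===== PORT B =====
def ciudadUnida_alt (N : Int) (M : Int) (mat : List (List Int)) : Int :=
  -- one-pass build: graph[x] = graph.get(x, set()) | s, with s = set(row) computed once per row
  let graph := mat.foldl (fun d row =>
      let s := PySem.Set.ofList row
      row.foldl (fun d x => d.insert x (PySem.Set.union (d.getD x []) s)) d)
      (PySem.Dict.empty : PySem.Dict Int (List Int))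
  let total : Int := graph.size
  -- single cumulative pass: counter += total - len(visited)
  (graph.keys.foldl (fun (st : Int × List Int) key =>
      let visited := pvDfs graph (graph.size + 2) st.2 key
      (st.1 + (total - (visited.length : Int)), visited)) ((0 : Int), ([] : List Int))).1

-- ===== PRECONDITION & SPEC =====
def Spec_ciudadUnida (N : Int) (M : Int) (mat : List (List Int)) (out : Int) : Prop := out = ciudadUnida_alt N M mat
instance (N : Int) (M : Int) (mat : List (List Int)) (out : Int) : Decidable (Spec_ciudadUnida N M mat out) := by unfold Spec_ciudadUnida; infer_instance

-- ===== CLAIM (what is proved, stated in full; the proofs are below) =====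
def Claim_equal_ciudadUnida : Prop := ∀ (N : Int) (M : Int) (mat : List (List Int)), Dom_ciudadUnida N M mat → Spec_ciudadUnida N M mat (ciudadUnida N M mat)

-- ===== LEMMAS AND PROOFS =====

-- the common build step and the common dict both ports construct
def pvStep (row : List Int) (d : PySem.Dict Int (List Int)) (x : Int) : PySem.Dict Int (List Int) :=
  d.insert x (PySem.Set.union (d.getD x []) (PySem.Set.ofList row))

def pvBuild (mat : List (List Int)) : PySem.Dict Int (List Int) :=
  mat.foldl (fun d row => row.foldl (pvStep row) d) PySem.Dict.empty


theorem pvDfs_mem_mono (g : PySem.Dict Int (List Int)) (fuel : Nat) : ∀ (vis : List Int) (a y : Int),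
    y ∈ vis → y ∈ pvDfs g fuel vis a := by
  induction fuel with
  | zero => intro vis a y hy; simpa [pvDfs] using hy
  | succ f ih =>
    intro vis a y hy
    simp only [pvDfs]
    split
    · exact hy
    · have : ∀ (l : List Int) (vis' : List Int), y ∈ vis' → y ∈ l.foldl (fun vis n => pvDfs g f vis n) vis' := by
        intro l
        induction l with
        | nil => intro vis' h; simpa using h
        | cons n t iht => intro vis' h; exact iht _ (ih _ _ _ h)
      exact this _ _ (by simp [hy])

theorem pvDfs_nodup (g : PySem.Dict Int (List Int)) (fuel : Nat) : ∀ (vis : List Int) (a : Int),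
    vis.Nodup → (pvDfs g fuel vis a).Nodup := by
  induction fuel with
  | zero => intro vis a h; simpa [pvDfs] using h
  | succ f ih =>
    intro vis a h
    simp only [pvDfs]
    split
    · exact h
    · rename_i hc
      have hna : a ∉ vis := by simpa using hc
      have : ∀ (l : List Int) (vis' : List Int), vis'.Nodup → (l.foldl (fun vis n => pvDfs g f vis n) vis').Nodup := by
        intro l
        induction l with
        | nil => intro vis' h'; simpa using h'
        | cons n t iht => intro vis' h'; exact iht _ (ih _ _ h')
      refine this _ _ ?_
      rw [List.nodup_append]
      refine ⟨h, List.nodup_singleton a, ?_⟩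
      intro z hz b hb heq
      exact hna ((List.mem_singleton.mp hb) ▸ heq ▸ hz)

theorem pvDfs_keys (g : PySem.Dict Int (List Int))
    (hK : ∀ a y, y ∈ g.getD a [] → y ∈ g.keys) (fuel : Nat) : ∀ (vis : List Int) (a : Int),
    (∀ y ∈ vis, y ∈ g.keys) → a ∈ g.keys →
    ∀ y ∈ pvDfs g fuel vis a, y ∈ g.keys := by
  induction fuel with
  | zero => intro vis a hvis _ y hy; exact hvis y (by simpa [pvDfs] using hy)
  | succ f ih =>
    intro vis a hvis ha y hy
    simp only [pvDfs] at hy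
    split at hy
    · exact hvis y hy
    · have hstep : ∀ (l : List Int) (vis' : List Int), (∀ n ∈ l, n ∈ g.keys) → (∀ z ∈ vis', z ∈ g.keys) →
          ∀ z ∈ l.foldl (fun vis n => pvDfs g f vis n) vis', z ∈ g.keys := by
        intro l
        induction l with
        | nil => intro vis' _ hv z hz; exact hv z (by simpa using hz)
        | cons n t iht =>
          intro vis' hn hv z hz
          exact iht _ (fun m hm => hn m (List.mem_cons_of_mem _ hm)) (ih _ _ hv (hn n (List.mem_cons_self))) z hz
      refine hstep _ _ (fun n hn => hK a n hn) ?_ y hy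
      intro z hz
      rcases List.mem_append.mp hz with h | h
      · exact hvis z h
      · simpa using (List.mem_singleton.mp h) ▸ ha

theorem pvDfs_idem (g : PySem.Dict Int (List Int)) (fuel : Nat) (vis : List Int) (a : Int)
    (ha : a ∈ vis) : pvDfs g fuel vis a = vis := by
  cases fuel with
  | zero => rfl
  | succ f => simp [pvDfs, ha]

theorem pvDfs_self_mem (g : PySem.Dict Int (List Int)) (fuel : Nat) (vis : List Int) (a : Int) :
    a ∈ pvDfs g (fuel + 1) vis a := by
  simp only [pvDfs]
  split
  · rename_i h; simpa using h
  · have : ∀ (l : List Int) (vis' : List Int), a ∈ vis' → a ∈ l.foldl (fun vis n => pvDfs g fuel vis n) vis' := by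
      intro l
      induction l with
      | nil => intro vis' h; simpa using h
      | cons n t iht => intro vis' h; exact iht _ (pvDfs_mem_mono g fuel _ _ _ h)
    exact this _ _ (by simp)

theorem pvBuild_keys_gen (rows : List (List Int)) : ∀ (d : PySem.Dict Int (List Int)),
    (rows.foldl (fun d row => row.foldl (pvStep row) d) d).keys = PySem.Set.update d.keys rows.flatten := by
  induction rows with
  | nil => intro d; simp [PySem.Set.update_nil]
  | cons row t ih =>
    intro d
    simp only [List.foldl_cons, List.flatten_cons]
    rw [ih, PySem.Set.update_append]
    congr 1
    exact PySem.Dict.keys_foldl_insert row (fun d x => PySem.Set.union (d.getD x []) (PySem.Set.ofList row)) d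

theorem pvBuild_keys (mat : List (List Int)) :
    (pvBuild mat).keys = PySem.Set.ofList mat.flatten := by
  rw [pvBuild, pvBuild_keys_gen]
  simp [PySem.Dict.keys_empty, PySem.Set.update_nil_left]

theorem pvBuild_nodup_gen (rows : List (List Int)) : ∀ (d : PySem.Dict Int (List Int)),
    d.keys.Nodup → (rows.foldl (fun d row => row.foldl (pvStep row) d) d).keys.Nodup := by
  induction rows with
  | nil => intro d h; simpa using h
  | cons row t ih =>
    intro d h
    simp only [List.foldl_cons]
    exact ih _ (PySem.Dict.nodup_keys_foldl_insert row
      (fun d x => PySem.Set.union (d.getD x []) (PySem.Set.ofList row)) d h)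

theorem pvBuild_nodup_keys (mat : List (List Int)) : (pvBuild mat).keys.Nodup := by
  exact pvBuild_nodup_gen mat PySem.Dict.empty (by simp [PySem.Dict.keys_empty])

theorem pvBuild_nodes_gen (F : List Int) (rows : List (List Int))
    (hrows : ∀ row ∈ rows, ∀ y ∈ row, y ∈ F) : ∀ (d : PySem.Dict Int (List Int)),
    (∀ k y, y ∈ d.getD k [] → y ∈ F) →
    ∀ k y, y ∈ (rows.foldl (fun d row => row.foldl (pvStep row) d) d).getD k [] → y ∈ F := by
  induction rows with
  | nil => intro d hd; simpa using hd
  | cons row t ih =>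
    intro d hd
    simp only [List.foldl_cons]
    refine ih (fun r hr => hrows r (List.mem_cons_of_mem _ hr)) _ ?_
    have hrow : ∀ y ∈ row, y ∈ F := hrows row List.mem_cons_self
    -- inner: fold over the cells of row
    have inner : ∀ (l : List Int) (d : PySem.Dict Int (List Int)),
        (∀ k y, y ∈ d.getD k [] → y ∈ F) →
        ∀ k y, y ∈ (l.foldl (pvStep row) d).getD k [] → y ∈ F := by
      intro l
      induction l with
      | nil => intro d hd; simpa using hd
      | cons x t2 ih2 =>
        intro d hd
        simp only [List.foldl_cons]
        refine ih2 _ ?_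
        intro k y hy
        by_cases hkx : k = x
        · subst hkx
          rw [pvStep, PySem.Dict.getD_insert_self] at hy
          rcases (PySem.Set.mem_union _ _ _).mp hy with h | h
          · exact hd k y h
          · exact hrow y ((PySem.Set.mem_ofList _ _).mp h)
        · rw [pvStep, PySem.Dict.getD_insert] at hy
          rw [if_neg hkx] at hy
          exact hd k y hy
    exact inner row d hd

theorem pvBuild_nodes (mat : List (List Int)) (a y : Int)
    (hy : y ∈ (pvBuild mat).getD a []) : y ∈ (pvBuild mat).keys := by
  rw [pvBuild_keys, PySem.Set.mem_ofList]
  refine pvBuild_nodes_gen mat.flatten mat ?_ PySem.Dict.empty ?_ a y hy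
  · intro row hr z hz; exact List.mem_flatten.mpr ⟨row, hr, hz⟩
  · intro k z hz; simp [PySem.Dict.getD_empty] at hz

theorem pvA_row (row : List Int) (d : PySem.Dict Int (List Int)) :
    (PySem.List.pyRange 0 (PySem.List.len row) 1).foldl (fun d j =>
        let x := PySem.List.pyGetD row j 0
        if d.contains x then
          d.insert x (PySem.Set.union (d.getD x []) (PySem.Set.ofList row))
        else
          d.insert x (PySem.Set.ofList row)) d
    = row.foldl (pvStep row) d := by
  rw [PySem.List.foldl_pyRange_zero_pyGetD row 0 (fun d x =>
        if d.contains x then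
          d.insert x (PySem.Set.union (d.getD x []) (PySem.Set.ofList row))
        else
          d.insert x (PySem.Set.ofList row)) d]
  congr 1
  funext d x
  by_cases h : d.contains x
  · simp [pvStep, h]
  · have hx : d.getD x [] = [] := PySem.Dict.getD_of_not_contains _ _ (by simpa using h)
    simp [pvStep, h, hx, PySem.Set.union, PySem.Set.update_nil_left, PySem.Set.ofList_ofList]

theorem pvA_pass1 (mat : List (List Int)) :
    ((PySem.List.pyRange 0 (PySem.List.len mat) 1).foldl (fun d i =>
      (PySem.List.pyRange 0 (PySem.List.len (PySem.List.pyGetD mat i [])) 1).foldl (fun d j =>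
        let x := PySem.List.pyGetD (PySem.List.pyGetD mat i []) j 0
        if d.contains x then
          d.insert x (PySem.Set.union (d.getD x []) (PySem.Set.ofList (PySem.List.pyGetD mat i [])))
        else
          d.insert x (PySem.Set.ofList (PySem.List.pyGetD mat i []))) d)
      (PySem.Dict.empty : PySem.Dict Int (List Int))) = pvBuild mat := by
  rw [PySem.List.foldl_pyRange_zero_pyGetD mat ([] : List Int) (fun d row =>
      (PySem.List.pyRange 0 (PySem.List.len row) 1).foldl (fun d j =>
        let x := PySem.List.pyGetD row j 0
        if d.contains x then
          d.insert x (PySem.Set.union (d.getD x []) (PySem.Set.ofList row))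
        else
          d.insert x (PySem.Set.ofList row)) d) PySem.Dict.empty]
  rw [pvBuild]
  congr 1
  funext d row
  exact pvA_row row d

-- overwriting an existing key with its own value changes nothing
theorem pvInsert_getD_self (d : PySem.Dict Int (List Int)) (x : Int) (dflt : List Int)
    (hnd : d.keys.Nodup) (hx : x ∈ d.keys) : d.insert x (d.getD x dflt) = d := by
  have hc : d.contains x = true := (PySem.Dict.contains_iff_mem_keys _ _).mpr hx
  apply PySem.Dict.ext
  rw [PySem.Dict.items_insert_of_contains _ _ hc]
  have : ∀ p ∈ d.items, (if p.1 == x then (x, d.getD x dflt) else p) = p := by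
    intro p hp
    by_cases h : p.1 = x
    · have hpx : (x, p.2) ∈ d.items := by
        have : p = (x, p.2) := by rw [← h]
        rwa [this] at hp
      have hv : d.getD x dflt = p.2 := PySem.Dict.getD_of_mem_items _ hpx hnd dflt
      simp [h, hv]
      rw [← h]
    · simp [h]
  rw [List.map_congr_left this]; exact List.map_id _

theorem pvPass2_id_inner (cells : List Int) : ∀ (d : PySem.Dict Int (List Int)),
    d.keys.Nodup → (∀ x ∈ cells, x ∈ d.keys) →
    cells.foldl (fun d x => d.insert x (d.getD x [])) d = d := by
  induction cells with
  | nil => intro d _ _; rfl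
  | cons x t ih =>
    intro d hnd hc
    simp only [List.foldl_cons]
    rw [pvInsert_getD_self d x [] hnd (hc x List.mem_cons_self)]
    exact ih d hnd (fun z hz => hc z (List.mem_cons_of_mem _ hz))

theorem pvPass2_row (row : List Int) (d : PySem.Dict Int (List Int)) :
    (PySem.List.pyRange 0 (PySem.List.len row) 1).foldl (fun d j =>
        let x := PySem.List.pyGetD row j 0
        d.insert x (d.getD x [])) d
    = row.foldl (fun d x => d.insert x (d.getD x [])) d :=
  PySem.List.foldl_pyRange_zero_pyGetD row 0 (fun d x => d.insert x (d.getD x [])) d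

theorem pvA_pass2 (mat : List (List Int)) :
    ((PySem.List.pyRange 0 (PySem.List.len mat) 1).foldl (fun d i =>
      (PySem.List.pyRange 0 (PySem.List.len (PySem.List.pyGetD mat i [])) 1).foldl (fun d j =>
        let x := PySem.List.pyGetD (PySem.List.pyGetD mat i []) j 0
        d.insert x (d.getD x [])) d) (pvBuild mat)) = pvBuild mat := by
  rw [PySem.List.foldl_pyRange_zero_pyGetD mat ([] : List Int) (fun d row =>
      (PySem.List.pyRange 0 (PySem.List.len row) 1).foldl (fun d j =>
        let x := PySem.List.pyGetD row j 0
        d.insert x (d.getD x [])) d) (pvBuild mat)]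
  have hrows : ∀ (rows : List (List Int)), (∀ row ∈ rows, ∀ x ∈ row, x ∈ (pvBuild mat).keys) →
      rows.foldl (fun d row =>
        (PySem.List.pyRange 0 (PySem.List.len row) 1).foldl (fun d j =>
          let x := PySem.List.pyGetD row j 0
          d.insert x (d.getD x [])) d) (pvBuild mat) = pvBuild mat := by
    intro rows
    induction rows with
    | nil => intro _; rfl
    | cons row t ih =>
      intro hmem
      simp only [List.foldl_cons]
      rw [pvPass2_row, pvPass2_id_inner row (pvBuild mat) (pvBuild_nodup_keys mat)
        (fun x hx => hmem row List.mem_cons_self x hx)]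
      exact ih (fun r hr => hmem r (List.mem_cons_of_mem _ hr))
  refine hrows mat ?_
  intro row hr x hx
  rw [pvBuild_keys, PySem.Set.mem_ofList]
  exact List.mem_flatten.mpr ⟨row, hr, hx⟩

theorem pvCount (ks vis : List Int) (hks : ks.Nodup) (hvis : vis.Nodup)
    (hsub : ∀ y ∈ vis, y ∈ ks) :
    ((ks.countP (fun k => !vis.contains k) : Int)) = (ks.length : Int) - (vis.length : Int) := by
  have hperm : (ks.filter (fun k => vis.contains k)).Perm vis := by
    rw [List.perm_ext_iff_of_nodup (hks.filter _) hvis]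
    intro a
    simp only [List.mem_filter, List.contains_iff_mem]
    constructor
    · rintro ⟨_, h⟩; simpa using h
    · intro h; exact ⟨hsub a h, by simpa using h⟩
  have h1 : ks.countP (fun k => vis.contains k) = vis.length := by
    rw [List.countP_eq_length_filter]; exact hperm.length_eq
  have h2 := List.length_eq_countP_add_countP (fun k => vis.contains k) (l := ks)
  have h3 : ks.countP (fun a => decide ¬(vis.contains a) = true) = ks.countP (fun k => !vis.contains k) := by
    apply List.countP_congr; intro a _; simp
  omega

theorem pvInner_idem (g : PySem.Dict Int (List Int)) (f : Nat) (key1 : Int)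
    (l : List Int) : ∀ (c : Int) (vis : List Int), key1 ∈ vis →
    l.foldl (fun (st : Int × List Int) key2 =>
        let visited := pvDfs g f st.2 key1
        if visited.contains key2 then (st.1, visited) else (st.1 + 1, visited)) (c, vis)
      = (c + (l.countP (fun k => !vis.contains k) : Int), vis) := by
  induction l with
  | nil => intro c vis _; simp
  | cons k t ih =>
    intro c vis h1
    simp only [List.foldl_cons, pvDfs_idem g f vis key1 h1]
    by_cases hk : vis.contains k
    · have hp : (!vis.contains k) = false := by rw [hk]; rfl
      rw [if_pos hk, ih c vis h1, List.countP_cons, hp]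
      simp
    · have hb : vis.contains k = false := Bool.not_eq_true _ ▸ eq_false_of_ne_true hk
      have hp : (!vis.contains k) = true := by rw [hb]; rfl
      rw [if_neg hk, ih (c+1) vis h1, List.countP_cons, hp]
      simp only [Prod.mk.injEq, and_true]
      push_cast
      ring

theorem pvInner (g : PySem.Dict Int (List Int)) (f : Nat) (key1 : Int)
    (l : List Int) (c : Int) (vis : List Int) (hl : l ≠ []) :
    l.foldl (fun (st : Int × List Int) key2 =>
        let visited := pvDfs g (f + 1) st.2 key1
        if visited.contains key2 then (st.1, visited) else (st.1 + 1, visited)) (c, vis)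
      = (c + (l.countP (fun k => !(pvDfs g (f + 1) vis key1).contains k) : Int),
         pvDfs g (f + 1) vis key1) := by
  cases l with
  | nil => exact absurd rfl hl
  | cons k t =>
    have hself : key1 ∈ pvDfs g (f + 1) vis key1 := pvDfs_self_mem g f vis key1
    simp only [List.foldl_cons]
    by_cases hk : (pvDfs g (f + 1) vis key1).contains k
    · have hp : (!(pvDfs g (f + 1) vis key1).contains k) = false := by rw [hk]; rfl
      rw [if_pos hk, pvInner_idem g (f+1) key1 t c _ hself, List.countP_cons, hp]
      simp
    · have hb : (pvDfs g (f + 1) vis key1).contains k = false := Bool.not_eq_true _ ▸ eq_false_of_ne_true hk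
      have hp : (!(pvDfs g (f + 1) vis key1).contains k) = true := by rw [hb]; rfl
      rw [if_neg hk, pvInner_idem g (f+1) key1 t (c+1) _ hself, List.countP_cons, hp]
      simp only [Prod.mk.injEq, and_true]
      push_cast
      ring

theorem pvOuter (g : PySem.Dict Int (List Int))
    (hK : ∀ a y, y ∈ g.getD a [] → y ∈ g.keys) (hnd : g.keys.Nodup)
    (l : List Int) : ∀ (c : Int) (vis : List Int), (∀ x ∈ l, x ∈ g.keys) →
    vis.Nodup → (∀ y ∈ vis, y ∈ g.keys) →
    l.foldl (fun (st : Int × List Int) key1 =>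
      g.keys.foldl (fun (st : Int × List Int) key2 =>
        let visited := pvDfs g (g.size + 2) st.2 key1
        if visited.contains key2 then (st.1, visited) else (st.1 + 1, visited)) st) (c, vis)
    = l.foldl (fun (st : Int × List Int) key =>
        let visited := pvDfs g (g.size + 2) st.2 key
        (st.1 + ((g.size : Int) - (visited.length : Int)), visited)) (c, vis) := by
  induction l with
  | nil => intro c vis _ _ _; rfl
  | cons key1 t ih =>
    intro c vis hl hvn hvk
    have hkey1 : key1 ∈ g.keys := hl key1 List.mem_cons_self
    have hne : g.keys ≠ [] := by intro h; rw [h] at hkey1; cases hkey1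
    set vis1 := pvDfs g (g.size + 2) vis key1 with hv1
    have hv1n : vis1.Nodup := pvDfs_nodup g _ vis key1 hvn
    have hv1k : ∀ y ∈ vis1, y ∈ g.keys := pvDfs_keys g hK _ vis key1 hvk hkey1
    have hsize : (g.size : Int) = (g.keys.length : Int) := by
      simp [PySem.Dict.size, PySem.Dict.keys]
    simp only [List.foldl_cons]
    rw [pvInner g (g.size + 1) key1 g.keys c vis hne]
    rw [pvCount g.keys vis1 hnd hv1n hv1k, ← hsize]
    exact ih _ _ (fun x hx => hl x (List.mem_cons_of_mem _ hx)) hv1n hv1k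

-- ===== VERDICT (by name: the statement is the Claim_ definition above) =====
theorem ciudadUnida_spec : Claim_equal_ciudadUnida := by
  intro N M mat _
  show _ = _
  unfold ciudadUnida ciudadUnida_alt
  simp only [pvA_pass1, pvA_pass2]
  have hK := pvBuild_nodes mat
  exact congrArg Prod.fst
    (pvOuter (pvBuild mat) hK (pvBuild_nodup_keys mat) (pvBuild mat).keys 0 [] (fun x h => h)
      List.nodup_nil (by intro y h; cases h))
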